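-- pv_equiv track=rewrite | github.com/IMWoo94/CodingStudy | 프로그래머스/Lv.0/181922. 수열과 구간 쿼리 4/수열과 구간 쿼리 4.py | solution
-- ===== SOURCE A (Python) =====
-- def solution(arr, queries):
--     answer = []
--     for s, e, k in queries:
--         for i in range(s,e+1):
--             if not k:
--                 arr[i] = arr[i]+1
--                 continue
--
--             if i%k ==0:
--                 arr[i] = arr[i]+1
--     answer = arr
--     return answer
-- ===== SOURCE B (Python) =====
-- def solution(arr, queries):
--     for s, e, k in queries:
--         if k == 0:
--             for i in range(s, e + 1):
--                 arr[i] += 1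
--         else:
--             d = abs(k)
--             start = s + (-s) % d
--             for i in range(start, e + 1, d):
--                 arr[i] += 1
--     return arr
-- ===== Notes on version B (the rewrite author's own statement) =====
-- stated objective: alternative
-- what changed: For k != 0, B jumps straight to the first multiple of |k| >= s and strides by |k| (range(start, e+1, |k|)), visiting only the incremented indices instead of testing i % k at every index in [s, e]; for k == 0 it increments the whole range.
import Mathlib
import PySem

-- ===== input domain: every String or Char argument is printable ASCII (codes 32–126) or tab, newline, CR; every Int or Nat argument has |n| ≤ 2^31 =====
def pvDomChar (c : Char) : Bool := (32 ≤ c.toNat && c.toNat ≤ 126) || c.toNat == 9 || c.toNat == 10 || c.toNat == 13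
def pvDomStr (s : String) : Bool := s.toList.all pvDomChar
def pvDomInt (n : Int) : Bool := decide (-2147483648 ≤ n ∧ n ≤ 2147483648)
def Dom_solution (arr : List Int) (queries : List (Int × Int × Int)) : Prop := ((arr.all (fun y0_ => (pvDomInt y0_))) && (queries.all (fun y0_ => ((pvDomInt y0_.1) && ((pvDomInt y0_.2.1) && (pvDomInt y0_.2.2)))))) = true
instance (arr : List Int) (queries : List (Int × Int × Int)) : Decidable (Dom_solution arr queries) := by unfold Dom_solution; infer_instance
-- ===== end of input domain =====

-- B replaces A's per-index divisibility test with a strided walk that visits only the multiples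
-- of |k| (objective: alternative traversal; not measured faster here). A mutates arr in place and
-- returns it; B performs the same mutation.

-- ===== PORT A =====
-- arr[i] = arr[i] + 1  (total forms of Python indexing; exact under Pre_, which keeps every
-- actually-accessed index in range)
def pyIncr (a : List Int) (i : Int) : List Int :=
  PySem.List.pySetD a i (PySem.List.pyGetD a i 0 + 1)

-- one iteration of A's outer loop: for i in range(s, e+1): if not k: incr; elif i % k == 0: incr
def stepA (a : List Int) (q : Int × Int × Int) : List Int :=
  (PySem.List.pyRange q.1 (q.2.1 + 1) 1).foldl
    (fun acc i =>
      if q.2.2 = 0 then pyIncr acc i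
      else if PySem.Int.mod i q.2.2 = 0 then pyIncr acc i else acc) a

def solution (arr : List Int) (queries : List (Int × Int × Int)) : List Int :=
  queries.foldl stepA arr

-- ===== PORT B =====
-- one iteration of B's outer loop: k == 0 → every index; else stride |k| from the first multiple ≥ s
def stepB (a : List Int) (q : Int × Int × Int) : List Int :=
  if q.2.2 = 0 then (PySem.List.pyRange q.1 (q.2.1 + 1) 1).foldl pyIncr a
  else
    let d := |q.2.2|
    let start := q.1 + PySem.Int.mod (-q.1) d
    (PySem.List.pyRange start (q.2.1 + 1) d).foldl pyIncr a

def solution_alt (arr : List Int) (queries : List (Int × Int × Int)) : List Int :=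
  queries.foldl stepB arr

-- ===== PRECONDITION & SPEC =====
-- Pre_ holds exactly on the inputs where the Python A returns (elsewhere it raises IndexError):
-- for every query, every index it actually increments (first = the smallest multiple of |k| ≥ s,
-- last = the largest ≤ e; for k = 0, s and e themselves) is a valid Python index, in [-len, len).
def Pre_solution (arr : List Int) (queries : List (Int × Int × Int)) : Prop :=
  ∀ q ∈ queries,
    (q.2.2 = 0 →
      (q.1 ≤ q.2.1 → -(arr.length : Int) ≤ q.1 ∧ q.2.1 < (arr.length : Int))) ∧
    (q.2.2 ≠ 0 →
      (q.1 + PySem.Int.mod (-q.1) |q.2.2| ≤ q.2.1 →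
        -(arr.length : Int) ≤ q.1 + PySem.Int.mod (-q.1) |q.2.2| ∧
        q.2.1 - PySem.Int.mod q.2.1 |q.2.2| < (arr.length : Int)))

instance (arr : List Int) (queries : List (Int × Int × Int)) : Decidable (Pre_solution arr queries) := by
  unfold Pre_solution; infer_instance

def pvWitness_solution : List Int × (List (Int × Int × Int)) := ([1, 2, 3, 4], [(0, 3, 2), (1, 2, 0)])

def Spec_solution (arr : List Int) (queries : List (Int × Int × Int)) (out : List Int) : Prop := out = solution_alt arr queries
instance (arr : List Int) (queries : List (Int × Int × Int)) (out : List Int) : Decidable (Spec_solution arr queries out) := by unfold Spec_solution; infer_instance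

-- ===== CLAIM (what is proved, stated in full; the proofs are below) =====
def Claim_equal_solution : Prop := ∀ (arr : List Int) (queries : List (Int × Int × Int)), Dom_solution arr queries → Pre_solution arr queries → Spec_solution arr queries (solution arr queries)

-- ===== LEMMAS AND PROOFS =====

-- a strided range with positive step is strictly increasing
lemma strided_pairwise (st b d : Int) (hd : 0 < d) :
    (PySem.List.pyRange st b d).Pairwise (· < ·) := by
  rw [PySem.List.pyRange_of_pos st b hd]
  refine List.Pairwise.map _ ?_ List.pairwise_lt_range
  intro a b h
  have h' : (a : Int) < (b : Int) := by exact_mod_cast h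
  have := mul_lt_mul_of_pos_left h' hd
  linarith

-- The indices A increments for a query with k ≠ 0 are exactly B's strided range.
lemma filter_range_eq (s e k : Int) (hk : k ≠ 0) :
    (PySem.List.pyRange s (e + 1) 1).filter (fun i => decide (PySem.Int.mod i k = 0)) =
      PySem.List.pyRange (s + PySem.Int.mod (-s) |k|) (e + 1) |k| := by
  have hd : (0:Int) < |k| := abs_pos.mpr hk
  set d : Int := |k| with hdk
  set st : Int := s + PySem.Int.mod (-s) d with hst
  have hmod_nn : 0 ≤ PySem.Int.mod (-s) d := PySem.Int.mod_nonneg _ hd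
  have hmod_lt : PySem.Int.mod (-s) d < d := PySem.Int.mod_lt _ hd
  have hdvd_st : d ∣ st := by
    have h := PySem.Int.floordiv_mul_add_mod (-s) d
    exact ⟨-(PySem.Int.floordiv (-s) d), by rw [hst]; linarith [h, mul_comm (PySem.Int.floordiv (-s) d) d]⟩
  have hs_le : s ≤ st := by rw [hst]; linarith
  have hst_lt : st < s + d := by rw [hst]; linarith
  have hpair := strided_pairwise st (e + 1) d hd
  refine List.Perm.eq_of_pairwise (fun a b _ _ h1 h2 => absurd h2 (not_lt.mpr h1.le))
    ((PySem.List.pairwise_lt_pyRange_one s (e+1)).filter _) hpair ?_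
  refine (List.perm_ext_iff_of_nodup ((PySem.List.nodup_pyRange_one s (e+1)).filter _)
    (hpair.imp (fun h => ne_of_lt h))).mpr ?_
  intro x
  simp only [List.mem_filter, PySem.List.mem_pyRange_one, decide_eq_true_eq,
    PySem.List.mem_pyRange_iff_of_pos hd, PySem.Int.mod_eq_zero_iff_dvd]
  constructor
  · rintro ⟨⟨hsx, hxe⟩, hkx⟩
    have hdx : d ∣ x := (abs_dvd k x).mpr hkx
    refine ⟨?_, hxe, dvd_sub hdx hdvd_st⟩
    by_contra hlt
    rw [not_le] at hlt
    obtain ⟨a, ha⟩ := hdx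
    obtain ⟨b, hb⟩ := hdvd_st
    have hab : a < b := lt_of_mul_lt_mul_left (by rw [← ha, ← hb]; exact hlt) hd.le
    have h1 : d * (a + 1) ≤ d * b := mul_le_mul_of_nonneg_left (by omega) hd.le
    have h2 : d * (a + 1) = x + d := by rw [ha]; ring
    linarith
  · rintro ⟨hstx, hxe, hdvd⟩
    have hdx : d ∣ x := by
      have := dvd_add hdvd hdvd_st
      simpa using this
    exact ⟨⟨by omega, hxe⟩, (abs_dvd k x).mp hdx⟩

-- per-query agreement of the two loop bodies
lemma step_eq (a : List Int) (q : Int × Int × Int) : stepA a q = stepB a q := by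
  by_cases hk : q.2.2 = 0
  · simp [stepA, stepB, hk]
  · simp only [stepA, stepB, if_neg hk]
    rw [PySem.List.foldl_ite_eq_foldl_filter]
    rw [filter_range_eq q.1 q.2.1 q.2.2 hk]

-- ===== VERDICT (by name: the statement is the Claim_ definition above) =====
theorem solution_spec : Claim_equal_solution := by
  intro arr queries _ _
  unfold Spec_solution solution solution_alt
  rw [show stepA = stepB from funext fun a => funext (step_eq a)]
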